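-- pv_equiv track=rewrite | github.com/nitinbajaj2104/Credentialing-Operations-Analysis | process_data.py | extract_addresses
-- ===== SOURCE A (Python) =====
-- def extract_addresses(addresses):
--     """
--     Extract LOCATION and MAILING addresses separately.
--     If an address type is missing, populate fields with 'Unknown'.
--     """
--
--     location = {
--         "address_1": "Unknown",
--         "city": "Unknown",
--         "state": "Unknown",
--         "postal_code": "Unknown"
--     }
--
--     mailing = {
--         "address_1": "Unknown",
--         "city": "Unknown",
--         "state": "Unknown",
--         "postal_code": "Unknown"
--     }
--
--     for addr in addresses:
--         if addr.get("address_purpose") == "LOCATION":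
--             location = {
--                 "address_1": addr.get("address_1", "Unknown"),
--                 "city": addr.get("city", "Unknown"),
--                 "state": addr.get("state", "Unknown"),
--                 "postal_code": addr.get("postal_code", "Unknown")
--             }
--         elif addr.get("address_purpose") == "MAILING":
--             mailing = {
--                 "address_1": addr.get("address_1", "Unknown"),
--                 "city": addr.get("city", "Unknown"),
--                 "state": addr.get("state", "Unknown"),
--                 "postal_code": addr.get("postal_code", "Unknown")
--             }
--
--     return location, mailing
-- ===== SOURCE B (Python) =====
-- FIELD_KEYS = ("address_1", "city", "state", "postal_code")
--
--
-- def extract_addresses(addresses):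
--     """
--     Extract LOCATION and MAILING addresses separately.
--     If an address type is missing, populate fields with 'Unknown'.
--     """
--
--     def fields(addr):
--         return {k: addr.get(k, "Unknown") for k in FIELD_KEYS}
--
--     def last_of(purpose):
--         for addr in reversed(addresses):
--             if addr.get("address_purpose") == purpose:
--                 return fields(addr)
--         return {k: "Unknown" for k in FIELD_KEYS}
--
--     return last_of("LOCATION"), last_of("MAILING")
-- ===== Notes on version B (the rewrite author's own statement) =====
-- stated objective: idiomatic
-- what changed: Replaces the forward loop that keeps overwriting two accumulator dicts with a reversed scan that returns the fields of the last address of each purpose (early exit), building each result dict once with a comprehension helper.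
import Mathlib
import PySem

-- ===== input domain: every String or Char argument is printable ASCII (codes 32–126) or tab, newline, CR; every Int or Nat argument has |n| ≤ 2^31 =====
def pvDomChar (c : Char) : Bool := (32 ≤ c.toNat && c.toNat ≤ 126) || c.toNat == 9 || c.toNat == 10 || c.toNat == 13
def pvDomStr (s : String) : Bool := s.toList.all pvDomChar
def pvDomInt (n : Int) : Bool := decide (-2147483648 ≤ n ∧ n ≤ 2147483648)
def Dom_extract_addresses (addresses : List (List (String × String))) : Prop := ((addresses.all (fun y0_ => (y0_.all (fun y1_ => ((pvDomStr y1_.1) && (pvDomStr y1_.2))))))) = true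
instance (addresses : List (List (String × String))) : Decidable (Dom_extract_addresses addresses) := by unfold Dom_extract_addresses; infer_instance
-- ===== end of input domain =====

-- ===== PORT A =====
-- B changes: reversed scan returning the last address per purpose instead of a forward loop overwriting accumulators (idiomatic restructuring).
-- dict.get(k[, dflt]) on an association list = first match (exact port of Python dict lookup under the type convention)
def pvGet? (addr : List (String × String)) (k : String) : Option String :=
  (addr.find? (fun p => p.1 == k)).map (·.2)

def pvGetD (addr : List (String × String)) (k dflt : String) : String :=
  (pvGet? addr k).getD dflt

def pvUnknownDict : List (String × String) :=
  [("address_1", "Unknown"), ("city", "Unknown"), ("state", "Unknown"), ("postal_code", "Unknown")]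

def pvFieldsA (addr : List (String × String)) : List (String × String) :=
  [("address_1", pvGetD addr "address_1" "Unknown"),
   ("city", pvGetD addr "city" "Unknown"),
   ("state", pvGetD addr "state" "Unknown"),
   ("postal_code", pvGetD addr "postal_code" "Unknown")]

def extract_addresses (addresses : List (List (String × String))) : (List (String × String)) × (List (String × String)) :=
  addresses.foldl
    (fun st addr =>
      if pvGet? addr "address_purpose" == some "LOCATION" then (pvFieldsA addr, st.2)
      else if pvGet? addr "address_purpose" == some "MAILING" then (st.1, pvFieldsA addr)
      else st)
    (pvUnknownDict, pvUnknownDict)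

-- ===== PORT B =====
def pvFieldKeys : List String := ["address_1", "city", "state", "postal_code"]

def pvFieldsB (addr : List (String × String)) : List (String × String) :=
  pvFieldKeys.map (fun k => (k, pvGetD addr k "Unknown"))

def pvLastOf (addresses : List (List (String × String))) (purpose : String) : List (String × String) :=
  match addresses.reverse.find? (fun addr => pvGet? addr "address_purpose" == some purpose) with
  | some addr => pvFieldsB addr
  | none => pvFieldKeys.map (fun k => (k, "Unknown"))

def extract_addresses_alt (addresses : List (List (String × String))) : (List (String × String)) × (List (String × String)) :=
  (pvLastOf addresses "LOCATION", pvLastOf addresses "MAILING")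

-- ===== PRECONDITION & SPEC =====
def Spec_extract_addresses (addresses : List (List (String × String))) (out : (List (String × String)) × (List (String × String))) : Prop := out = extract_addresses_alt addresses
instance (addresses : List (List (String × String))) (out : (List (String × String)) × (List (String × String))) : Decidable (Spec_extract_addresses addresses out) := by unfold Spec_extract_addresses; infer_instance

-- ===== CLAIM (what is proved, stated in full; the proofs are below) =====
def Claim_equal_extract_addresses : Prop := ∀ (addresses : List (List (String × String))), Dom_extract_addresses addresses → Spec_extract_addresses addresses (extract_addresses addresses)

-- ===== LEMMAS AND PROOFS =====
theorem fieldsB_eq_fieldsA (addr : List (String × String)) : pvFieldsB addr = pvFieldsA addr := by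
  simp [pvFieldsB, pvFieldsA, pvFieldKeys]

theorem unknown_eq : pvFieldKeys.map (fun k => (k, "Unknown")) = pvUnknownDict := by
  simp [pvFieldKeys, pvUnknownDict]

-- characterises A's fold: each component is the fields of the LAST address of that purpose, defaulting to the accumulator
theorem foldl_eq_lastOf (xs : List (List (String × String))) :
    ∀ (l m : List (String × String)),
      xs.foldl
        (fun st addr =>
          if pvGet? addr "address_purpose" == some "LOCATION" then (pvFieldsA addr, st.2)
          else if pvGet? addr "address_purpose" == some "MAILING" then (st.1, pvFieldsA addr)
          else st) (l, m)
      = ((match xs.reverse.find? (fun addr => pvGet? addr "address_purpose" == some "LOCATION") with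
          | some addr => pvFieldsA addr | none => l),
         (match xs.reverse.find? (fun addr => pvGet? addr "address_purpose" == some "MAILING") with
          | some addr => pvFieldsA addr | none => m)) := by
  induction xs with
  | nil => intro l m; simp
  | cons a t ih =>
    intro l m
    simp only [List.foldl_cons, List.reverse_cons, List.find?_append]
    by_cases hL : (pvGet? a "address_purpose" == some "LOCATION") = true
    · rw [if_pos hL, ih]
      rcases hF : t.reverse.find? (fun addr => pvGet? addr "address_purpose" == some "LOCATION") with _ | a'
      all_goals rcases hM : t.reverse.find? (fun addr => pvGet? addr "address_purpose" == some "MAILING") with _ | a''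
      all_goals simp_all [List.find?]
    · rw [if_neg hL]
      by_cases hM2 : (pvGet? a "address_purpose" == some "MAILING") = true
      · rw [if_pos hM2, ih]
        rw [Bool.not_eq_true] at hL
        rcases hF : t.reverse.find? (fun addr => pvGet? addr "address_purpose" == some "LOCATION") with _ | a'
        all_goals rcases hM : t.reverse.find? (fun addr => pvGet? addr "address_purpose" == some "MAILING") with _ | a''
        all_goals simp only [List.find?, hL, hM2]
        all_goals simp_all
      · rw [if_neg hM2, ih]
        rw [Bool.not_eq_true] at hL hM2
        rcases hF : t.reverse.find? (fun addr => pvGet? addr "address_purpose" == some "LOCATION") with _ | a'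
        all_goals rcases hM : t.reverse.find? (fun addr => pvGet? addr "address_purpose" == some "MAILING") with _ | a''
        all_goals simp only [List.find?, hL, hM2]
        all_goals simp_all

-- ===== VERDICT (by name: the statement is the Claim_ definition above) =====
theorem extract_addresses_spec : Claim_equal_extract_addresses := by
  intro addresses _
  unfold Spec_extract_addresses extract_addresses extract_addresses_alt pvLastOf
  rw [foldl_eq_lastOf]
  rcases hF : addresses.reverse.find? (fun addr => pvGet? addr "address_purpose" == some "LOCATION") with _ | a
  all_goals rcases hM : addresses.reverse.find? (fun addr => pvGet? addr "address_purpose" == some "MAILING") with _ | a'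
  all_goals simp [fieldsB_eq_fieldsA, unknown_eq]
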